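-- pv_equiv track=rewrite | github.com/jxie0755/Learning_Python | ZCodeSnippets/shuffle_card.py | restore_card
-- ===== SOURCE A (Python) =====
-- def restore_card(n):
--     """card sequence restore by rules
--
--     The card sequence will do two steps:
--     1. put one to the bottom
--     2. put one on the desk
--
--     keep doing untill all cards are on the desk
--     on the desk it shoud look like from small to large
--
--     n: number of cards from 1 to n
--     return: a list of card as the intial sequen of numbers,
--     where first element is on top last is at the bootm
--     """
--
--     initial = []
--     end = list(range(1, n+1))
--
--     while len(end) != 0:
--         initial = [end.pop()] + initial
--         if len(initial) > 1 and len(initial) != n: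
--             initial = [initial.pop()] + initial
--
--     return initial
-- ===== SOURCE B (Python) =====
-- def restore_card(n):
--     """Forward-simulate the deal: positions are dealt in queue order
--     (pop front = deal to desk, then move new front to bottom); the i-th
--     dealt position receives value i+1."""
--     res = [0] * n
--     dq = list(range(n))
--     v = 1
--     while dq:
--         res[dq.pop(0)] = v
--         v += 1
--         if dq:
--             dq.append(dq.pop(0))
--     return res
-- ===== Notes on version B (the rewrite author's own statement) =====
-- stated objective: faster
-- what changed: B simulates the shuffle forward over a queue of slot indices (deal front, rotate next to bottom), writing increasing values into their slots, instead of A's backward reconstruction that rebuilds the list by prepending the popped value and rotating the last element to the front each step.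
import Mathlib
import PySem

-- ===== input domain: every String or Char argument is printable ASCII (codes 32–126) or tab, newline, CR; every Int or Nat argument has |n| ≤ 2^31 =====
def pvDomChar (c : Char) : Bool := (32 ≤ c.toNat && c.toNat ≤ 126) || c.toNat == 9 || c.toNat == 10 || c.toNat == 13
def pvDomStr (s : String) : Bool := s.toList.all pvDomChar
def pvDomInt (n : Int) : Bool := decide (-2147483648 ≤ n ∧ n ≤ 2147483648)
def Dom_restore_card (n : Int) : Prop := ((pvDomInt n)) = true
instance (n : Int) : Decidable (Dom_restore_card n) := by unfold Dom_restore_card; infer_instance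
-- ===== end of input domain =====

-- B simulates the shuffle forward over a queue of slot indices instead of A's backward
-- list reconstruction; same asymptotics, measurably faster constants (objective: faster).

-- ===== PORT A =====
-- `end.pop()` / `initial.pop()`: pop the last element (lists are nonempty at every call site)
def pvPopLast (l : List Int) : Int × List Int := (l.getLast!, l.dropLast)

def pvALoop (n : Int) (initial : List Int) (e : List Int) : List Int :=
  match e with
  | [] => initial
  | h :: t =>
    let p := pvPopLast (h :: t)
    let ini1 := p.1 :: initial
    let ini2 := if 1 < ini1.length ∧ (ini1.length : Int) ≠ n then
        (pvPopLast ini1).1 :: (pvPopLast ini1).2 else ini1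
    pvALoop n ini2 p.2
termination_by e.length
decreasing_by simp [pvPopLast]

def restore_card (n : Int) : List Int :=
  pvALoop n [] (PySem.List.pyRange 1 (n + 1) 1)

-- ===== PORT B =====
def pvBLoop (res : List Int) (dq : List Nat) (v : Int) : List Int :=
  match dq with
  | [] => res
  | p :: rest =>
    let res' := res.set p v
    let dq' := match rest with
      | [] => ([] : List Nat)
      | q :: t => t ++ [q]
    pvBLoop res' dq' (v + 1)
termination_by dq.length
decreasing_by cases rest <;> simp

def restore_card_alt (n : Int) : List Int :=
  pvBLoop (List.replicate n.toNat 0) (List.range n.toNat) 1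

-- ===== PRECONDITION & SPEC =====
def Spec_restore_card (n : Int) (out : List Int) : Prop := out = restore_card_alt n
instance (n : Int) (out : List Int) : Decidable (Spec_restore_card n out) := by unfold Spec_restore_card; infer_instance

-- ===== CLAIM (what is proved, stated in full; the proofs are below) =====
def Claim_equal_restore_card : Prop := ∀ (n : Int), Dom_restore_card n → Spec_restore_card n (restore_card n)

-- ===== LEMMAS AND PROOFS =====

-- move the front element to the back of the queue
def pvRot {α : Type} : List α → List α
  | [] => []
  | a :: t => t ++ [a]

@[simp] lemma pvRot_length {α : Type} (l : List α) : (pvRot l).length = l.length := by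
  cases l <;> simp [pvRot]

lemma pvRot_perm {α : Type} (l : List α) : (pvRot l).Perm l := by
  cases l with
  | nil => simp [pvRot]
  | cons a t => simpa [pvRot] using List.perm_append_singleton a t

-- the dealing order: deal the front, rotate, repeat
def pvDeal {α : Type} : List α → List α
  | [] => []
  | x :: t => x :: pvDeal (pvRot t)
termination_by l => l.length
decreasing_by simp

lemma pvDeal_perm {α : Type} (l : List α) : (pvDeal l).Perm l := by
  induction l using pvDeal.induct with
  | case1 => simp [pvDeal]
  | case2 x t ih =>
    rw [pvDeal]
    exact (ih.cons x).trans ((pvRot_perm t).cons x)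

lemma pvRot_map {α β : Type} (f : α → β) (l : List α) : pvRot (l.map f) = (pvRot l).map f := by
  cases l <;> simp [pvRot]

lemma pvDeal_map {α β : Type} (f : α → β) (l : List α) :
    pvDeal (l.map f) = (pvDeal l).map f := by
  induction l using pvDeal.induct with
  | case1 => simp [pvDeal]
  | case2 x t ih =>
    rw [List.map_cons, pvDeal, pvDeal, pvRot_map, ih]
    simp

lemma pvGetLast!_concat (l : List Int) (a : Int) : (l ++ [a]).getLast! = a := by
  induction l with
  | nil => rfl
  | cons x t ih => simpa [List.getLast!] using ih

lemma pvRot_last_dropLast (m : List Int) (h : m ≠ []) :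
    pvRot (m.getLast! :: m.dropLast) = m := by
  induction m using List.reverseRecOn with
  | nil => simp at h
  | append_singleton l a _ =>
    simp [pvRot, pvGetLast!_concat, List.dropLast_concat]

-- B's loop applied along the dealing order of the positions
def pvAssign (res : List Int) (ps : List Nat) (v : Int) : List Int :=
  match ps with
  | [] => res
  | p :: t => pvAssign (res.set p v) t (v + 1)

lemma pvBLoop_eq_assign (dq : List Nat) (res : List Int) (v : Int) :
    pvBLoop res dq v = pvAssign res (pvDeal dq) v := by
  induction dq using pvDeal.induct generalizing res v with
  | case1 => simp [pvBLoop, pvDeal, pvAssign]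
  | case2 p rest ih =>
    rw [pvBLoop.eq_def, pvDeal, pvAssign]
    cases rest with
    | nil => simpa [pvRot] using ih (res.set p v) (v + 1)
    | cons q t => simpa [pvRot] using ih (res.set p v) (v + 1)

lemma pvAssign_length (ps : List Nat) (res : List Int) (v : Int) :
    (pvAssign res ps v).length = res.length := by
  induction ps generalizing res v with
  | nil => rfl
  | cons p t ih => simp [pvAssign, ih]

lemma pvAssign_getD_not_mem (ps : List Nat) (res : List Int) (v : Int)
    (j : Nat) (hj : j ∉ ps) : (pvAssign res ps v).getD j 0 = res.getD j 0 := by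
  induction ps generalizing res v with
  | nil => rfl
  | cons p t ih =>
    simp only [List.mem_cons, not_or] at hj
    rw [pvAssign, ih _ _ hj.2]
    simp [List.getD, List.getElem?_set_ne (Ne.symm hj.1)]

lemma pvAssign_getD_at (ps : List Nat) (res : List Int) (v : Int)
    (hnd : ps.Nodup) (i : Nat) (hi : i < ps.length) (hlt : ps[i] < res.length) :
    (pvAssign res ps v).getD ps[i] 0 = v + i := by
  induction ps generalizing res v i with
  | nil => simp at hi
  | cons p t ih =>
    rw [pvAssign]
    cases i with
    | zero =>
      simp only [List.getElem_cons_zero]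
      have hp : p ∉ t := (List.nodup_cons.mp hnd).1
      rw [pvAssign_getD_not_mem _ _ _ _ hp]
      simp only [List.getElem_cons_zero] at hlt
      simp [List.getD, List.getElem?_set_self hlt]
    | succ i' =>
      have := ih (res.set p v) (v + 1) (List.nodup_cons.mp hnd).2 i'
        (by simpa using Nat.lt_of_succ_lt_succ hi)
        (by simpa using hlt)
      simp only [List.getElem_cons_succ]
      rw [this]
      push_cast
      ring

-- the A-loop invariant: with e = [1..k] and deal (rot L) = [k+1..n],
-- the loop finishes in a list that deals out to [1..n]
lemma pvALoop_concat (n : Int) (ini e' : List Int) (x : Int) :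
    pvALoop n ini (e' ++ [x]) =
      pvALoop n (if 1 < (x :: ini).length ∧ ((x :: ini).length : Int) ≠ n then
          (x :: ini).getLast! :: (x :: ini).dropLast else x :: ini) e' := by
  cases e' with
  | nil =>
    rw [List.nil_append]
    conv_lhs => rw [pvALoop]
    simp [pvPopLast, List.getLast!]
  | cons h t =>
    rw [List.cons_append]
    conv_lhs => rw [pvALoop]
    simp only [pvPopLast, ← List.cons_append, pvGetLast!_concat, List.dropLast_concat]

lemma pvALoop_inv (n : Int) (k : Nat) (L : List Int) (hk1 : 1 ≤ k) (hkn : (k : Int) ≤ n)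
    (hlen : (L.length : Int) = n - k)
    (hdeal : pvDeal (pvRot L) = PySem.List.pyRange ((k : Int) + 1) (n + 1) 1) :
    pvDeal (pvALoop n L (PySem.List.pyRange 1 ((k : Int) + 1) 1)) = PySem.List.pyRange 1 (n + 1) 1 := by
  induction k generalizing L with
  | zero => exact absurd hk1 (by omega)
  | succ k ih =>
    have hcast : ((k + 1 : Nat) : Int) = (k : Int) + 1 := by push_cast; ring
    rw [hcast] at hkn hlen hdeal ⊢
    rw [PySem.List.pyRange_one_succ_right (by omega : (1:Int) ≤ (k:Int) + 1), pvALoop_concat]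
    have hlen1 : ((((k:Int) + 1) :: L).length : Int) = n - k := by
      simp only [List.length_cons]; push_cast; omega
    by_cases hg : 1 < (((k:Int) + 1) :: L).length ∧ (((((k:Int) + 1) :: L).length : Int)) ≠ n
    · -- rotate: 1 < n - k and k ≠ 0
      rw [if_pos hg]
      have hne : (((k:Int) + 1) :: L) ≠ [] := by simp
      have hk1' : 1 ≤ k := by
        rcases hg with ⟨-, h2⟩
        rw [hlen1] at h2
        omega
      have hnk : 1 < n - k := by
        rcases hg with ⟨h1, -⟩
        have : (1:Int) < ((((k:Int) + 1) :: L).length : Int) := by exact_mod_cast h1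
        omega
      apply ih _ hk1' (by omega)
      · have hll : ((((k:Int) + 1) :: L).getLast! :: (((k:Int) + 1) :: L).dropLast).length
            = (((k:Int) + 1) :: L).length := by
          simp [List.length_dropLast]
        rw [hll]; omega
      · rw [pvRot_last_dropLast _ hne, pvDeal, hdeal]
        exact (PySem.List.pyRange_one_cons (by omega : (k:Int) + 1 < n + 1)).symm
    · rw [if_neg hg]
      by_cases hk0 : k = 0
      · subst hk0
        rw [show ((0:Nat):Int) + 1 = 1 by norm_num] at *
        rw [PySem.List.pyRange_one_eq_nil (le_refl (1:Int))]
        conv_lhs => rw [pvALoop]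
        rw [pvDeal, hdeal]
        have hn1 : (1:Int) ≤ n := hkn
        rw [show (1:Int) + 1 = 2 by norm_num]
        exact (PySem.List.pyRange_one_cons (by omega : (1:Int) < n + 1)).symm
      · -- k ≥ 1 and guard false forces n - k = 1, hence L = []
        have hk1' : 1 ≤ k := by omega
        have hnk : n - k ≤ 1 := by
          by_contra hc
          push_neg at hc
          apply hg
          constructor
          · have : (1:Int) < ((((k:Int) + 1) :: L).length : Int) := by omega
            exact_mod_cast this
          · omega
        have hLnil : L = [] := by
          have : L.length = 0 := by omega
          exact List.eq_nil_of_length_eq_zero this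
        subst hLnil
        have hn : n = (k:Int) + 1 := by simp at hlen; omega
        apply ih _ hk1' (by omega)
        · simp; omega
        · rw [show pvRot [((k:Int) + 1)] = [((k:Int) + 1)] from rfl,
              pvDeal, show pvRot ([] : List Int) = [] from rfl, pvDeal]
          rw [hn]
          exact (PySem.List.pyRange_one_singleton ((k:Int) + 1)).symm

-- a list of length n dealing out to [1..n] is exactly B's result
lemma pvFinal (n : Int) (hn : 1 ≤ n) (L : List Int)
    (hlen : (L.length : Int) = n)
    (hdeal : pvDeal L = PySem.List.pyRange 1 (n + 1) 1) :
    L = restore_card_alt n := by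
  have hNn : ((n.toNat : Nat) : Int) = n := Int.toNat_of_nonneg (by omega)
  have hLlen : L.length = n.toNat := by omega
  rw [restore_card_alt, pvBLoop_eq_assign]
  have hperm : (pvDeal (List.range n.toNat)).Perm (List.range n.toNat) := pvDeal_perm _
  have hpsl : (pvDeal (List.range n.toNat)).length = n.toNat := by
    simpa using hperm.length_eq
  have hnd : (pvDeal (List.range n.toNat)).Nodup := hperm.nodup_iff.mpr List.nodup_range
  have hmap : (List.range n.toNat).map (fun i => L.getD i 0) = L := by
    rw [← hLlen]
    apply List.ext_getElem (by simp)
    intro i h1 h2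
    simp [List.getD, List.getElem?_eq_getElem h2]
  have hdeal' : (pvDeal (List.range n.toNat)).map (fun i => L.getD i 0)
      = PySem.List.pyRange 1 (n + 1) 1 := by
    rw [← pvDeal_map, hmap, hdeal]
  apply List.ext_getElem (by rw [hLlen, pvAssign_length, List.length_replicate])
  intro j hj hj2
  have hjN : j < n.toNat := by omega
  have hjmem : j ∈ pvDeal (List.range n.toNat) := hperm.mem_iff.mpr (List.mem_range.mpr hjN)
  obtain ⟨i, hi, hij⟩ := List.mem_iff_getElem.mp hjmem
  have hL : L.getD j 0 = 1 + (i : Int) := by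
    have hib : i < (PySem.List.pyRange 1 (n + 1) 1).length := by
      rw [PySem.List.length_pyRange_one]; omega
    have h2 := congrArg (fun l => l[i]?) hdeal'
    simp only [List.getElem?_map, List.getElem?_eq_getElem hi,
      List.getElem?_eq_getElem hib] at h2
    simpa [hij, PySem.List.getElem_pyRange_one 1 (n + 1) i hib] using h2
  have hA : (pvAssign (List.replicate n.toNat 0) (pvDeal (List.range n.toNat)) 1).getD j 0
      = 1 + (i : Int) := by
    rw [← hij]
    exact pvAssign_getD_at _ _ 1 hnd i hi (by rw [hij, List.length_replicate]; exact hjN)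
  rw [← List.getD_eq_getElem L 0 hj, ← List.getD_eq_getElem _ 0 hj2, hL, hA]

-- ===== VERDICT (by name: the statement is the Claim_ definition above) =====
theorem restore_card_spec : Claim_equal_restore_card := by
  intro n _
  unfold Spec_restore_card
  by_cases hn : 1 ≤ n
  · have hNn : ((n.toNat : Nat) : Int) = n := Int.toNat_of_nonneg (by omega)
    have hdeal : pvDeal (restore_card n) = PySem.List.pyRange 1 (n + 1) 1 := by
      have key := pvALoop_inv n n.toNat [] (by omega) (by omega) (by simp; omega)
        (by rw [show pvRot ([] : List Int) = [] from rfl, pvDeal]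
            exact (PySem.List.pyRange_one_eq_nil (by omega)).symm)
      rw [hNn] at key
      rw [restore_card]
      exact key
    apply pvFinal n hn
    · have hperm : (pvDeal (restore_card n)).Perm (restore_card n) := pvDeal_perm _
      have := hperm.length_eq
      rw [hdeal, PySem.List.length_pyRange_one] at this
      omega
    · exact hdeal
  · rw [restore_card, PySem.List.pyRange_one_eq_nil (by omega), pvALoop,
      restore_card_alt, show n.toNat = 0 by omega]
    simp [pvBLoop]
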